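-- pv_equiv track=rewrite | github.com/yieldthought/mpiptop | mpiptop.py | mark_diff_line
-- ===== SOURCE A (Python) =====
-- from typing import Dict, Iterable, List, Optional, Sequence, Tuple
--
-- def mark_diff_line(lines: List[str], diff_index: int) -> List[str]:
--     if diff_index is None:
--         return lines
--     marked = list(lines)
--     stack_pos = 0
--     for idx, line in enumerate(marked):
--         if line.startswith("  "):
--             if stack_pos == diff_index:
--                 if line.startswith("  "):
--                     marked[idx] = "➤ " + line[2:]
--                 else:
--                     marked[idx] = "➤ " + line
--                 break
--             stack_pos += 1
--     return marked
-- ===== SOURCE B (Python) =====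
-- def mark_diff_line(lines, diff_index):
--     if diff_index is None:
--         return lines
--     # staged passes: assign each line its rank among indented lines (or None),
--     # then rebuild the whole list, rewriting the line whose rank equals diff_index
--     ranks = []
--     r = 0
--     for line in lines:
--         if line.startswith("  "):
--             ranks.append(r)
--             r += 1
--         else:
--             ranks.append(None)
--     return ["\u27a4 " + line[2:] if k == diff_index else line
--             for line, k in zip(lines, ranks)]
-- ===== Notes on version B (the rewrite author's own statement) =====
-- stated objective: alternative
-- what changed: Replaces A's in-place counting search with early break by two staged passes: first assign every line its rank among indented lines, then rebuild the whole list in one comprehension, rewriting the line whose rank equals diff_index.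
import Mathlib
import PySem

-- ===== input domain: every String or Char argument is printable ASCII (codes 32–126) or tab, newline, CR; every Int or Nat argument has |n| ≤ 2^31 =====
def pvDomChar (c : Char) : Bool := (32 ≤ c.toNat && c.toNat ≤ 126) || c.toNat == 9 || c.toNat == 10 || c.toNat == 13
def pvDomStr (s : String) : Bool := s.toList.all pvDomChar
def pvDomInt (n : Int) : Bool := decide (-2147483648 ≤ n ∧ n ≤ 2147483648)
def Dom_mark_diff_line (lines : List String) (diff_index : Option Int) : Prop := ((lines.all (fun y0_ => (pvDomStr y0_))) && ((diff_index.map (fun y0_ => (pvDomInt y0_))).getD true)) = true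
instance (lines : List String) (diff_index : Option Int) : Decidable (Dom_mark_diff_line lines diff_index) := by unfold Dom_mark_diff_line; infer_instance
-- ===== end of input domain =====

-- B replaces A's counting search with early break by two staged passes:
-- assign every line its rank among indented lines, then rebuild the whole
-- list, rewriting the line whose rank equals diff_index (alternative decomposition).

-- ===== PORT A =====
-- A's for-loop with counter stack_pos and break, as structural recursion over the remaining lines.
def markLoopA (target : Int) : List String → Int → List String
  | [], _ => []
  | l :: rest, pos =>
    if PySem.Str.startswith l "  " then
      if pos == target then
        (if PySem.Str.startswith l "  " then
          "➤ " ++ PySem.Str.slice l (some 2) none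
        else
          "➤ " ++ l) :: rest
      else l :: markLoopA target rest (pos + 1)
    else l :: markLoopA target rest pos

def mark_diff_line (lines : List String) (diff_index : Option Int) : List String :=
  match diff_index with
  | none => lines
  | some d => markLoopA d lines 0

-- ===== PORT B =====
-- first staged pass: each line's rank among indented lines, or none
def ranksB : List String → Int → List (Option Int)
  | [], _ => []
  | l :: rest, r =>
    if PySem.Str.startswith l "  " then some r :: ranksB rest (r + 1)
    else none :: ranksB rest r

-- the comprehension's per-element expression
def markCellB (d : Int) (p : String × Option Int) : String :=
  if p.2 == some d then "➤ " ++ PySem.Str.slice p.1 (some 2) none else p.1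

def mark_diff_line_alt (lines : List String) (diff_index : Option Int) : List String :=
  match diff_index with
  | none => lines
  | some d => (lines.zip (ranksB lines 0)).map (markCellB d)

-- ===== PRECONDITION & SPEC =====
def Spec_mark_diff_line (lines : List String) (diff_index : Option Int) (out : List String) : Prop := out = mark_diff_line_alt lines diff_index
instance (lines : List String) (diff_index : Option Int) (out : List String) : Decidable (Spec_mark_diff_line lines diff_index out) := by unfold Spec_mark_diff_line; infer_instance

-- ===== CLAIM (what is proved, stated in full; the proofs are below) =====
def Claim_equal_mark_diff_line : Prop := ∀ (lines : List String) (diff_index : Option Int), Dom_mark_diff_line lines diff_index → Spec_mark_diff_line lines diff_index (mark_diff_line lines diff_index)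

-- ===== LEMMAS AND PROOFS =====

theorem markLoopA_shift (lines : List String) : ∀ (d pos : Int),
    markLoopA d lines (pos + 1) = markLoopA (d - 1) lines pos := by
  induction lines with
  | nil => intro d pos; rfl
  | cons l rest ih =>
    intro d pos
    simp only [markLoopA]
    cases hcond : PySem.Str.startswith l "  " with
    | false => simp only [Bool.false_eq_true, if_false]; rw [ih]
    | true =>
      simp only [if_true]
      by_cases h : pos = d - 1
      · have h1 : (pos + 1 == d) = true := by simp only [beq_iff_eq]; omega
        have h2 : (pos == d - 1) = true := by simp only [beq_iff_eq]; omega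
        rw [if_pos h1, if_pos h2]
      · have h1 : ¬ ((pos + 1 == d) = true) := by simp only [beq_iff_eq]; omega
        have h2 : ¬ ((pos == d - 1) = true) := by simp only [beq_iff_eq]; omega
        rw [if_neg h1, if_neg h2, ih]

theorem ranksB_shift (lines : List String) : ∀ (r : Int),
    ranksB lines (r + 1) = (ranksB lines r).map (Option.map (· + 1)) := by
  induction lines with
  | nil => intro r; rfl
  | cons l rest ih =>
    intro r
    simp only [ranksB]
    cases hcond : PySem.Str.startswith l "  " <;>
      simp only [Bool.false_eq_true, if_true, if_false, List.map_cons, Option.map_some,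
        Option.map_none, ih]

theorem zipmap_shift (lines : List String) : ∀ (R : List (Option Int)) (d : Int),
    (lines.zip (R.map (Option.map (· + 1)))).map (markCellB d)
      = (lines.zip R).map (markCellB (d - 1)) := by
  induction lines with
  | nil => intro R d; rfl
  | cons l rest ih =>
    intro R d
    cases R with
    | nil => rfl
    | cons k R' =>
      simp only [List.map_cons, List.zip_cons_cons, ih]
      congr 1
      cases k with
      | none => rfl
      | some v =>
        simp only [markCellB, Option.map_some]
        by_cases h : v = d - 1
        · have h1 : (some (v + 1) == some d) = true := by
            simp only [beq_iff_eq, Option.some.injEq]; omega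
          have h2 : (some v == some (d - 1)) = true := by
            simp only [beq_iff_eq, Option.some.injEq]; omega
          rw [if_pos h1, if_pos h2]
        · have h1 : ¬ ((some (v + 1) == some d) = true) := by
            simp only [beq_iff_eq, Option.some.injEq]; omega
          have h2 : ¬ ((some v == some (d - 1)) = true) := by
            simp only [beq_iff_eq, Option.some.injEq]; omega
          rw [if_neg h1, if_neg h2]

theorem noMatch (lines : List String) : ∀ (r d : Int), d < r →
    (lines.zip (ranksB lines r)).map (markCellB d) = lines := by
  induction lines with
  | nil => intro r d _; rfl
  | cons l rest ih =>
    intro r d hd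
    simp only [ranksB]
    cases hcond : PySem.Str.startswith l "  " with
    | true =>
      simp only [if_true, List.zip_cons_cons, List.map_cons]
      have h1 : ¬ ((some r == some d) = true) := by
        simp only [beq_iff_eq, Option.some.injEq]; omega
      rw [show markCellB d (l, some r) = l from by simp only [markCellB, if_neg h1]]
      rw [ih (r + 1) d (by omega)]
    | false =>
      simp only [Bool.false_eq_true, if_false, List.zip_cons_cons, List.map_cons]
      rw [show markCellB d (l, none) = l from rfl, ih r d hd]

theorem main_lemma (lines : List String) : ∀ (d : Int),
    markLoopA d lines 0 = (lines.zip (ranksB lines 0)).map (markCellB d) := by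
  induction lines with
  | nil => intro d; rfl
  | cons l rest ih =>
    intro d
    simp only [markLoopA, ranksB]
    cases hcond : PySem.Str.startswith l "  " with
    | false =>
      simp only [Bool.false_eq_true, if_false, List.zip_cons_cons, List.map_cons]
      rw [show markCellB d (l, none) = l from rfl, ih d]
    | true =>
      simp only [if_true, List.zip_cons_cons, List.map_cons]
      by_cases hd : d = 0
      · subst hd
        simp only [beq_self_eq_true, if_true]
        rw [show markCellB 0 (l, some 0) = "➤ " ++ PySem.Str.slice l (some 2) none from by
          simp [markCellB]]
        congr 1
        rw [show (0 : Int) + 1 = 0 + 1 from rfl, ranksB_shift, zipmap_shift]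
        exact (noMatch rest 0 (0 - 1) (by omega)).symm
      · have h0 : ¬ (((0 : Int) == d) = true) := by simp only [beq_iff_eq]; omega
        rw [if_neg h0]
        rw [show markCellB d (l, some 0) = l from by
          simp only [markCellB, beq_iff_eq, Option.some.injEq]
          rw [if_neg (by omega)]]
        rw [show (0 : Int) + 1 = 0 + 1 from rfl, markLoopA_shift, ranksB_shift,
          zipmap_shift, ih (d - 1)]

-- ===== VERDICT (by name: the statement is the Claim_ definition above) =====
theorem mark_diff_line_spec : Claim_equal_mark_diff_line := by
  intro lines di _
  unfold Spec_mark_diff_line mark_diff_line mark_diff_line_alt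
  cases di with
  | none => rfl
  | some d => exact main_lemma lines d
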